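-- pv_equiv track=rewrite | github.com/MLouis8/robinson-shensted | RS_suites_extraites.py | robinson_schensted
-- ===== SOURCE A (Python) =====
-- from typing import List
--
-- def robinson_schensted(l: List[int]) -> List[List[int]]:
--     """Returns Robinson-Schensted table.
--
--     >>> robinson_schensted([3, 8, 4, 1, 2])
--     [[1, 2], [3, 4], [8]]
--
--     >>> robinson_schensted('acdbaedbc')
--     [['a', 'a', 'b', 'c'], ['b', 'd', 'd'], ['c', 'e']]
--     """
--     def insert_in_line(e: int, t: List, line_id: int) -> None:
--         if (len(t) <= line_id):
--             t.append([])
--         for i, e1 in enumerate(t[line_id]):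
--             if e1 > e:
--                 t[line_id][i] = e
--                 insert_in_line(e1, t, line_id+1)
--                 return
--         t[line_id].append(e)
--     t: List = []
--     for e in l:
--         insert_in_line(e, t, 0)
--     return t
-- ===== SOURCE B (Python) =====
-- from typing import List
--
-- def robinson_schensted(l: List[int]) -> List[List[int]]:
--     """Iterative Schensted insertion using binary search per row (O(n log n))."""
--     t: List[List[int]] = []
--     for e in l:
--         cur = e
--         row_id = 0
--         while True:
--             if row_id == len(t):
--                 t.append([cur])
--                 break
--             row = t[row_id]
--             lo, hi = 0, len(row)
--             while lo < hi:
--                 mid = (lo + hi) // 2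
--                 if cur < row[mid]:
--                     hi = mid
--                 else:
--                     lo = mid + 1
--             if lo == len(row):
--                 row.append(cur)
--                 break
--             cur, row[lo] = row[lo], cur
--             row_id += 1
--     return t
-- ===== Notes on version B (the rewrite author's own statement) =====
-- stated objective: faster
-- what changed: Replaces A's recursive insert with a linear scan of each row by an iterative bumping loop that finds the bump position with a hand-written binary search on the sorted row, O(n log n) instead of O(n^2).
import Mathlib
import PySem

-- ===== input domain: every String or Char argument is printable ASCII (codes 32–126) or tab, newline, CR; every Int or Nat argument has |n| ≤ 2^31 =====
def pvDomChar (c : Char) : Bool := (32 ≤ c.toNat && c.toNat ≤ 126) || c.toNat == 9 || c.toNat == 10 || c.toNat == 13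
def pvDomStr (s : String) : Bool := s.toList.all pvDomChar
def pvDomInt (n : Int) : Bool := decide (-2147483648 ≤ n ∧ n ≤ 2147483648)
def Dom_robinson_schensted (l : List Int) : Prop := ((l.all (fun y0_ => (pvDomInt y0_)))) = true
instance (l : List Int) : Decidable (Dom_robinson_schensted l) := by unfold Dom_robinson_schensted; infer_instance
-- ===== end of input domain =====

-- B replaces A's recursive insert with linear scans per row by an iterative bumping
-- loop using binary search on each (sorted) row; equal outputs, proved below.

-- ===== PORT A =====
-- the 'for i, e1 in enumerate(t[line_id])' scan: replaces the first element > e by e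
-- and reports it as bumped, otherwise appends e at the end of the row
def scanA (e : Int) : List Int → List Int × Option Int
  | [] => ([e], none)
  | x :: xs =>
    if x > e then (e :: xs, some x)
    else
      let r := scanA e xs
      (x :: r.1, r.2)

-- insert_in_line(e, t, line_id), acting on the suffix of rows from line_id on
-- (when the suffix is empty, A appends [] and the scan of the empty row appends e)
def insertA (e : Int) : List (List Int) → List (List Int)
  | [] => [[e]]
  | row :: rest =>
    match scanA e row with
    | (row', none) => row' :: rest
    | (row', some bumped) => row' :: insertA bumped rest

def robinson_schensted (l : List Int) : List (List Int) :=
  l.foldl (fun t e => insertA e t) []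

-- ===== PORT B =====
-- Source B's hand-written binary search: first index in [lo, hi) whose element is > e
def bisectB (row : List Int) (e : Int) (lo hi : Nat) : Nat :=
  if _h : lo < hi then
    let mid := (lo + hi) / 2
    if e < row.getD mid 0 then bisectB row e lo mid
    else bisectB row e (mid + 1) hi
  else lo
termination_by hi - lo
decreasing_by all_goals omega

-- Source B's inner 'while True' loop, walking down the rows with the current element
def insertB (cur : Int) : List (List Int) → List (List Int)
  | [] => [[cur]]
  | row :: rest =>
    let j := bisectB row cur 0 row.length
    if j = row.length then (row ++ [cur]) :: rest
    else (row.set j cur) :: insertB (row.getD j 0) rest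

def robinson_schensted_alt (l : List Int) : List (List Int) :=
  l.foldl (fun t e => insertB e t) []

-- ===== PRECONDITION & SPEC =====
def Spec_robinson_schensted (l : List Int) (out : List (List Int)) : Prop := out = robinson_schensted_alt l
instance (l : List Int) (out : List (List Int)) : Decidable (Spec_robinson_schensted l out) := by unfold Spec_robinson_schensted; infer_instance

-- ===== CLAIM (what is proved, stated in full; the proofs are below) =====
def Claim_equal_robinson_schensted : Prop := ∀ (l : List Int), Dom_robinson_schensted l → Spec_robinson_schensted l (robinson_schensted l)

-- ===== LEMMAS AND PROOFS =====

-- characterisation of findIdx: j with nothing matching before it and a match at it (or j = length)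
theorem findIdx_eq_of {p : Int → Bool} : ∀ (row : List Int) (j : ℕ) (hjl : j ≤ row.length),
    (∀ k (hk : k < j), ¬ p (row.get ⟨k, by omega⟩)) →
    (∀ h : j < row.length, p (row.get ⟨j, h⟩)) →
    row.findIdx p = j := by
  intro row
  induction row with
  | nil =>
    intro j hj _ _
    have : j = 0 := by simpa using hj
    simp [this]
  | cons x xs ih =>
    intro j hj h1 h2
    cases hpx : p x with
    | true =>
      cases j with
      | zero => simp [List.findIdx_cons, hpx]
      | succ k =>
        exact absurd (by simpa using hpx) (by simpa using h1 0 (by omega))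
    | false =>
      cases j with
      | zero =>
        have := h2 (by simp)
        simp only [List.get_eq_getElem, List.getElem_cons_zero] at this
        rw [this] at hpx; cases hpx
      | succ k =>
        simp only [List.findIdx_cons, hpx, cond_false]
        have := ih k (by simpa using hj)
          (fun m hm => by simpa using h1 (m+1) (by omega))
          (fun h => by simpa using h2 (by simpa using h))
        omega

theorem not_p_of_lt_findIdx {p : Int → Bool} : ∀ (row : List Int) (k : ℕ) (hk : k < row.findIdx p),
    ¬ p (row.get ⟨k, Nat.lt_of_lt_of_le hk (List.findIdx_le_length)⟩) := by
  intro row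
  induction row with
  | nil => simp
  | cons x xs ih =>
    intro k hk
    cases hpx : p x with
    | true => simp [List.findIdx_cons, hpx] at hk
    | false =>
      simp only [List.findIdx_cons, hpx, cond_false] at hk
      cases k with
      | zero => simp [hpx]
      | succ m => simpa using ih m (by omega)

theorem p_at_findIdx {p : Int → Bool} (row : List Int) (h : row.findIdx p < row.length) :
    p (row.get ⟨row.findIdx p, h⟩) := by
  simpa using List.findIdx_getElem (w := h)

-- scanA computed through the first index whose element exceeds e
theorem scanA_eq (e : Int) : ∀ (row : List Int),
    scanA e row =
      (if row.findIdx (fun x => decide (e < x)) < row.length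
        then (row.set (row.findIdx (fun x => decide (e < x))) e,
              some (row.getD (row.findIdx (fun x => decide (e < x))) 0))
        else (row ++ [e], none)) := by
  intro row
  induction row with
  | nil => simp [scanA]
  | cons x xs ih =>
    by_cases hx : e < x
    · have hgt : x > e := hx
      have hpx : decide (e < x) = true := by simpa using hx
      simp only [scanA, if_pos hgt, List.findIdx_cons, hpx, cond_true]
      rw [if_pos (by simp)]
      simp
    · have hx' : ¬ x > e := hx
      have hpx : decide (e < x) = false := by simpa using hx
      simp only [scanA, if_neg hx', List.findIdx_cons, hpx, cond_false]
      rw [ih]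
      by_cases hlt : xs.findIdx (fun x => decide (e < x)) < xs.length
      · rw [if_pos hlt, if_pos (by simp only [List.length_cons]; omega)]
        simp
      · rw [if_neg hlt, if_neg (by simp only [List.length_cons]; omega)]
        simp

-- binary-search correctness on a sorted row, by induction on the interval width
theorem bisectB_eq_findIdx_aux (row : List Int) (e : Int)
    (hs : List.Pairwise (· ≤ ·) row) :
    ∀ (n lo hi : ℕ), hi - lo ≤ n → lo ≤ hi → hi ≤ row.length →
    (∀ k, k < lo → ¬ e < row.getD k 0) →
    (∀ k, hi ≤ k → k < row.length → e < row.getD k 0) →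
    bisectB row e lo hi = row.findIdx (fun x => decide (e < x)) := by
  have hsort : ∀ i j (hi : i < row.length) (hj : j < row.length), i ≤ j →
      row.get ⟨i, hi⟩ ≤ row.get ⟨j, hj⟩ := by
    intro i j hi hj hij
    rcases Nat.lt_or_ge i j with h | h
    · simpa using (List.pairwise_iff_getElem.mp hs) i j hi hj h
    · have : i = j := by omega
      subst this; simp
  have hgetD : ∀ k (hk : k < row.length), row.getD k 0 = row.get ⟨k, hk⟩ := by
    intro k hk; simp [List.getD_eq_getElem?_getD, List.getElem?_eq_getElem hk]
  have base : ∀ lo, lo ≤ row.length →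
      (∀ k, k < lo → ¬ e < row.getD k 0) →
      (∀ k, lo ≤ k → k < row.length → e < row.getD k 0) →
      lo = row.findIdx (fun x => decide (e < x)) := by
    intro lo hlo h1 h2
    refine (findIdx_eq_of row lo hlo ?_ ?_).symm
    · intro k hk
      have := h1 k hk
      rw [hgetD k (by omega)] at this
      simpa using this
    · intro h
      have := h2 lo (by omega) h
      rw [hgetD lo h] at this
      simpa using this
  intro n
  induction n with
  | zero =>
    intro lo hi hn hlh hhl h1 h2
    have heq : lo = hi := by omega
    subst heq
    rw [bisectB, dif_neg (by omega)]
    exact base lo hhl h1 h2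
  | succ n ih =>
    intro lo hi hn hlh hhl h1 h2
    by_cases hlohi : lo < hi
    · rw [bisectB, dif_pos hlohi]
      have hmidlt : (lo + hi) / 2 < hi := by omega
      have hmidge : lo ≤ (lo + hi) / 2 := by omega
      have hmidlen : (lo + hi) / 2 < row.length := by omega
      by_cases hc : e < row.getD ((lo + hi) / 2) 0
      · rw [if_pos hc]
        refine ih lo ((lo + hi) / 2) (by omega) (by omega) (by omega) h1 ?_
        intro k hk hklen
        rw [hgetD k hklen]
        rw [hgetD _ hmidlen] at hc
        exact lt_of_lt_of_le hc (hsort _ _ hmidlen hklen hk)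
      · rw [if_neg hc]
        refine ih ((lo + hi) / 2 + 1) hi (by omega) (by omega) hhl ?_ h2
        intro k hk
        have hklen : k < row.length := by omega
        rw [hgetD k hklen]
        rw [hgetD _ hmidlen] at hc
        intro hlt
        exact hc (lt_of_lt_of_le hlt (hsort _ _ hklen hmidlen (by omega)))
    · rw [bisectB, dif_neg hlohi]
      have heq : lo = hi := by omega
      subst heq
      exact base lo hhl h1 h2

theorem bisectB_eq_findIdx (row : List Int) (e : Int)
    (hs : List.Pairwise (· ≤ ·) row) :
    bisectB row e 0 row.length = row.findIdx (fun x => decide (e < x)) :=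
  bisectB_eq_findIdx_aux row e hs row.length 0 row.length (by omega) (by omega) (le_refl _)
    (by omega) (by omega)

-- bumping preserves sortedness of the row
theorem sorted_set (row : List Int) (e : Int)
    (hs : List.Pairwise (· ≤ ·) row)
    (hj : row.findIdx (fun x => decide (e < x)) < row.length) :
    List.Pairwise (· ≤ ·) (row.set (row.findIdx (fun x => decide (e < x))) e) := by
  set j := row.findIdx (fun x => decide (e < x)) with hjdef
  rw [List.pairwise_iff_getElem]
  intro a b ha hb hab
  simp only [List.length_set] at ha hb
  have hsort := List.pairwise_iff_getElem.mp hs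
  rw [List.getElem_set, List.getElem_set]
  split_ifs with h1 h2 h2
  · omega
  · -- a = j < b : e ≤ row[b]
    have hej : e < row.get ⟨j, hj⟩ := by simpa using p_at_findIdx (p := fun x => decide (e < x)) row hj
    have hle : row.get ⟨j, hj⟩ ≤ row[b] := by
      simpa using hsort j b hj hb (by omega)
    simp only [List.get_eq_getElem] at hej hle
    omega
  · -- a < j = b : row[a] ≤ e
    have := not_p_of_lt_findIdx (p := fun x => decide (e < x)) row a (by omega)
    simp only [List.get_eq_getElem, decide_eq_true_eq, not_lt] at this
    omega
  · exact hsort a b ha hb hab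

theorem sorted_append (row : List Int) (e : Int)
    (hs : List.Pairwise (· ≤ ·) row)
    (hj : ¬ row.findIdx (fun x => decide (e < x)) < row.length) :
    List.Pairwise (· ≤ ·) (row ++ [e]) := by
  rw [List.pairwise_append]
  refine ⟨hs, by simp, ?_⟩
  intro a ha y hy
  have hye : y = e := by simpa using hy
  rw [hye]
  obtain ⟨k, hak⟩ := List.mem_iff_get.mp ha
  have hkj : (k : ℕ) < row.findIdx (fun x => decide (e < x)) := by
    have := List.findIdx_le_length (p := fun x => decide (e < x)) (xs := row)
    have hk := k.isLt
    omega
  have := not_p_of_lt_findIdx (p := fun x => decide (e < x)) row k hkj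
  simp only [List.get_eq_getElem, decide_eq_true_eq, not_lt] at this
  rw [← hak]
  simpa using this

-- one insertion: A's recursive scan = B's binary-search loop, on sorted rows
theorem insert_eq : ∀ (t : List (List Int)) (e : Int),
    (∀ r ∈ t, List.Pairwise (· ≤ ·) r) → insertA e t = insertB e t := by
  intro t
  induction t with
  | nil => intro e _; rfl
  | cons row rest ih =>
    intro e hsorted
    have hrow := hsorted row (by simp)
    have hrest : ∀ r ∈ rest, List.Pairwise (· ≤ ·) r :=
      fun r hr => hsorted r (by simp [hr])
    simp only [insertA, insertB, scanA_eq, bisectB_eq_findIdx row e hrow]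
    by_cases hlt : row.findIdx (fun x => decide (e < x)) < row.length
    · rw [if_pos hlt, if_neg (by omega)]
      simp [ih _ hrest]
    · rw [if_neg hlt, if_pos (by
        have := List.findIdx_le_length (p := fun x => decide (e < x)) (xs := row)
        omega)]

-- one insertion preserves sortedness of all rows
theorem insert_sorted : ∀ (t : List (List Int)) (e : Int),
    (∀ r ∈ t, List.Pairwise (· ≤ ·) r) →
    (∀ r ∈ insertA e t, List.Pairwise (· ≤ ·) r) := by
  intro t
  induction t with
  | nil => intro e _ r hr; simp [insertA] at hr; simp [hr]
  | cons row rest ih =>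
    intro e hsorted r hr
    have hrow := hsorted row (by simp)
    have hrest : ∀ r ∈ rest, List.Pairwise (· ≤ ·) r :=
      fun r hr => hsorted r (by simp [hr])
    simp only [insertA, scanA_eq] at hr
    by_cases hlt : row.findIdx (fun x => decide (e < x)) < row.length
    · rw [if_pos hlt] at hr
      simp only [List.mem_cons] at hr
      rcases hr with hr | hr
      · subst hr; exact sorted_set row e hrow hlt
      · exact ih _ hrest r hr
    · rw [if_neg hlt] at hr
      simp only [List.mem_cons] at hr
      rcases hr with hr | hr
      · subst hr; exact sorted_append row e hrow hlt
      · exact hrest r hr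

theorem fold_eq : ∀ (l : List Int) (t : List (List Int)),
    (∀ r ∈ t, List.Pairwise (· ≤ ·) r) →
    l.foldl (fun t e => insertA e t) t = l.foldl (fun t e => insertB e t) t := by
  intro l
  induction l with
  | nil => intro t _; rfl
  | cons e l ih =>
    intro t ht
    simp only [List.foldl_cons]
    rw [← insert_eq t e ht]
    exact ih _ (insert_sorted t e ht)

-- ===== VERDICT (by name: the statement is the Claim_ definition above) =====
theorem robinson_schensted_spec : Claim_equal_robinson_schensted := by
  intro l _
  show robinson_schensted l = robinson_schensted_alt l
  exact fold_eq l [] (by simp)
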